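-- pv_equiv track=rewrite | github.com/lastime1650/EDR_NDR__event_collector | NDR/util/subprocess_util.py | input_subprocess_stdout_split
-- ===== SOURCE A (Python) =====
-- def input_subprocess_stdout_split(input:str)->list[str]:
--     output: list[str] = []
--
--     for row in input.split("\n"):
--
--         is_blank = False
--         tmp_string = ""
--         for s in row:
--
--
--
--             if is_blank == False and s == " ":
--                 is_blank = True
--                 if len(tmp_string) > 0:
--                     output.append(
--                         tmp_string
--                     )
--                     tmp_string = ""
--                 continue
--
--             if is_blank and not (s == " "):
--                 is_blank = False
--                 tmp_string += s
--                 continue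
--
--             if is_blank:
--                 continue
--
--             tmp_string += s
--
--     return output
-- ===== SOURCE B (Python) =====
-- def input_subprocess_stdout_split(input: str) -> list[str]:
--     # Token-level pass: split each line on single spaces, drop the final
--     # (non-space-terminated) field via the [:-1] slice, keep non-empty fields.
--     return [tok
--             for row in input.split("\n")
--             for tok in row.split(" ")[:-1]
--             if tok]
-- ===== Notes on version B (the rewrite author's own statement) =====
-- stated objective: simpler
-- what changed: Replaced A's per-character is_blank/buffer state machine with a one-line token-level comprehension: split each line on the space character, drop the last (non-space-terminated) field with the [:-1] slice, and keep the non-empty fields.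
import Mathlib
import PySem

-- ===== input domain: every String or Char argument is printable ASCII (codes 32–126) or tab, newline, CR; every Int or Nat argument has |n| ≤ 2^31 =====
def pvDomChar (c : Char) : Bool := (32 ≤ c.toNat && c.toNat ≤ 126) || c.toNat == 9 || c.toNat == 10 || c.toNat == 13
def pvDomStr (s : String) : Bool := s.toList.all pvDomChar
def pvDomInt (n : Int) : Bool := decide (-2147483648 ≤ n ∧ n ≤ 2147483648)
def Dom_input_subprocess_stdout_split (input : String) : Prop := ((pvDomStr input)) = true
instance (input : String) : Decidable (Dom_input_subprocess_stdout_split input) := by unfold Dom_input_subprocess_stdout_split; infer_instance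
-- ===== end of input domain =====

-- B replaces A's per-character is_blank/buffer state machine by a token-level pass
-- (split each line on " ", drop the last field with [:-1], keep non-empty fields): simpler.


-- ===== PORT A =====
-- str values are carried as List Char; the final .map String.ofList converts back.
-- One step of A's inner character loop: state = (is_blank, tmp_string, output).
def pvAStep (st : Bool × List Char × List (List Char)) (s : Char) : Bool × List Char × List (List Char) :=
  let (is_blank, tmp, output) := st
  if is_blank == false && s == ' ' then
    (true, [], if tmp.length > 0 then output ++ [tmp] else output)
  else if is_blank && !(s == ' ') then
    (false, tmp ++ [s], output)
  else if is_blank then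
    st
  else
    (is_blank, tmp ++ [s], output)

def input_subprocess_stdout_split (input : String) : List String :=
  ((PySem.Chars.splitOn input.toList ['\n']).foldl
    (fun output row => (row.foldl pvAStep (false, [], output)).2.2)
    []).map String.ofList

-- ===== PORT B =====
-- Source B: [tok for row in input.split("\n") for tok in row.split(" ")[:-1] if tok]
-- ([:-1] on a list is List.dropLast; truthiness of a str is ≠ "").
def input_subprocess_stdout_split_alt (input : String) : List String :=
  ((PySem.Chars.splitOn input.toList ['\n']).flatMap
    (fun row => ((PySem.Chars.splitOn row [' ']).dropLast).filter (fun t => t ≠ [])))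
    |>.map String.ofList

-- ===== PRECONDITION & SPEC =====
def Spec_input_subprocess_stdout_split (input : String) (out : List String) : Prop := out = input_subprocess_stdout_split_alt input
instance (input : String) (out : List String) : Decidable (Spec_input_subprocess_stdout_split input out) := by unfold Spec_input_subprocess_stdout_split; infer_instance

-- ===== CLAIM (what is proved, stated in full; the proofs are below) =====
def Claim_equal_input_subprocess_stdout_split : Prop := ∀ (input : String), Dom_input_subprocess_stdout_split input → Spec_input_subprocess_stdout_split input (input_subprocess_stdout_split input)

-- ===== LEMMAS AND PROOFS =====

-- Structural recursion computing splitOn for a single-character separator.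
def pvSp1 (c0 : Char) : List Char → List (List Char)
  | [] => [[]]
  | c :: cs =>
    if c = c0 then [] :: pvSp1 c0 cs
    else match pvSp1 c0 cs with
      | t :: ts => (c :: t) :: ts
      | [] => [[c]]

theorem pvSp1_ne_nil (c0 : Char) (l : List Char) : pvSp1 c0 l ≠ [] := by
  cases l with
  | nil => simp [pvSp1]
  | cons c cs =>
    simp only [pvSp1]
    split
    · simp
    · split <;> simp

-- modifyHead with (pointwise) identity is the identity (specialised helper).
theorem pvModifyHead_id (l : List (List Char)) : List.modifyHead (fun t => t) l = l := by
  cases l <;> rfl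

theorem pvGo_eq (c0 : Char) (l : List Char) : ∀ (fuel : Nat) (cur : List Char)
    (acc : List (List Char)), l.length ≤ fuel →
    PySem.Chars.splitOn.go [c0] (fuel + 1) l cur acc
      = acc.reverse ++ (pvSp1 c0 l).modifyHead (fun t => cur.reverse ++ t) := by
  induction l with
  | nil =>
    intro fuel cur acc _
    simp [PySem.Chars.splitOn.go, pvSp1]
  | cons c rest ih =>
    intro fuel cur acc hlen
    obtain ⟨f, rfl⟩ : ∃ f, fuel = f + 1 := ⟨fuel - 1, by simp at hlen; omega⟩
    have hrest : rest.length ≤ f := by simp at hlen; omega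
    rw [show f + 1 + 1 = (f + 1).succ from rfl]
    simp only [PySem.Chars.splitOn.go]
    by_cases hc : c = c0
    · subst hc
      have hpre : List.isPrefixOf [c] (c :: rest) = true := by simp [List.isPrefixOf]
      rw [if_pos hpre]
      simp only [List.length_cons, List.length_nil, List.drop_succ_cons, List.drop_zero]
      rw [ih f [] (cur.reverse :: acc) hrest]
      simp [pvSp1, pvModifyHead_id]
    · have hpre : List.isPrefixOf [c0] (c :: rest) = false := by
        simp [List.isPrefixOf]; exact fun h => absurd h.symm hc
      rw [if_neg (by simp [hpre])]
      rw [ih f (c :: cur) acc hrest]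
      simp only [pvSp1, if_neg hc]
      rcases h : pvSp1 c0 rest with _ | ⟨t, ts⟩
      · exact absurd h (pvSp1_ne_nil c0 rest)
      · simp

theorem pvSplitOn_eq_sp1 (c0 : Char) (l : List Char) :
    PySem.Chars.splitOn l [c0] = pvSp1 c0 l := by
  show PySem.Chars.splitOn.go [c0] (l.length + 1) l [] [] = _
  rw [pvGo_eq c0 l l.length [] [] (le_refl _)]
  simp [pvModifyHead_id]

-- What A's inner loop contributes per row, as a structural recursion on the row.
def pvF (tmp : List Char) : List Char → List (List Char)
  | [] => []
  | c :: cs =>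
    if c = ' ' then (if tmp = [] then [] else [tmp]) ++ pvF [] cs
    else pvF (tmp ++ [c]) cs

theorem pvInner_eq (cs : List Char) : ∀ (b : Bool) (tmp : List Char)
    (out : List (List Char)), (b = true → tmp = []) →
    (cs.foldl pvAStep (b, tmp, out)).2.2 = out ++ pvF tmp cs := by
  induction cs with
  | nil => intro b tmp out _; simp [pvF]
  | cons c cs ih =>
    intro b tmp out hinv
    rw [List.foldl_cons]
    by_cases hc : c = ' '
    · subst hc
      cases b with
      | false =>
        by_cases htmp : tmp = []
        · subst htmp
          have hstep : pvAStep (false, [], out) ' ' = (true, [], out) := by simp [pvAStep]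
          rw [hstep, ih true [] out (fun _ => rfl)]
          simp [pvF]
        · have hlen : tmp.length > 0 := by cases tmp <;> simp_all
          have hstep : pvAStep (false, tmp, out) ' ' = (true, [], out ++ [tmp]) := by
            simp [pvAStep, hlen]
          rw [hstep, ih true [] (out ++ [tmp]) (fun _ => rfl)]
          simp [pvF, htmp]
      | true =>
        have htmp := hinv rfl; subst htmp
        have hstep : pvAStep (true, [], out) ' ' = (true, [], out) := by simp [pvAStep]
        rw [hstep, ih true [] out (fun _ => rfl)]
        simp [pvF]
    · cases b with
      | false =>
        have hstep : pvAStep (false, tmp, out) c = (false, tmp ++ [c], out) := by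
          simp [pvAStep, hc]
        rw [hstep, ih false (tmp ++ [c]) out (by simp)]
        simp [pvF, hc]
      | true =>
        have htmp := hinv rfl; subst htmp
        have hstep : pvAStep (true, [], out) c = (false, [c], out) := by simp [pvAStep, hc]
        rw [hstep, ih false [c] out (by simp)]
        simp [pvF, hc]

theorem pvF_eq_sp1 (cs : List Char) : ∀ (tmp : List Char),
    pvF tmp cs = (((pvSp1 ' ' cs).modifyHead (fun t => tmp ++ t)).dropLast).filter (fun t => t ≠ []) := by
  induction cs with
  | nil => intro tmp; simp [pvF, pvSp1]
  | cons c cs ih =>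
    intro tmp
    by_cases hc : c = ' '
    · subst hc
      simp only [pvF, pvSp1]
      rw [ih []]
      have hne := pvSp1_ne_nil ' ' cs
      rcases h : pvSp1 ' ' cs with _ | ⟨t, ts⟩
      · exact absurd h hne
      · by_cases htmp : tmp = [] <;> simp [htmp]
    · simp only [pvF, if_neg hc, pvSp1]
      rw [ih (tmp ++ [c])]
      rcases h : pvSp1 ' ' cs with _ | ⟨t, ts⟩
      · exact absurd h (pvSp1_ne_nil ' ' cs)
      · simp

-- Per-row agreement: A's inner loop appends exactly B's tokens for that row.
theorem pvRow_eq (row : List Char) (out : List (List Char)) :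
    (row.foldl pvAStep (false, [], out)).2.2
      = out ++ ((PySem.Chars.splitOn row [' ']).dropLast).filter (fun t => t ≠ []) := by
  rw [pvInner_eq row false [] out (by simp), pvF_eq_sp1 row [], pvSplitOn_eq_sp1]
  have : List.modifyHead (fun t => [] ++ t) (pvSp1 ' ' row) = pvSp1 ' ' row := by
    simp only [List.nil_append]
    exact pvModifyHead_id _
  rw [this]

theorem input_subprocess_stdout_split_eq_alt (input : String) :
    input_subprocess_stdout_split input = input_subprocess_stdout_split_alt input := by
  unfold input_subprocess_stdout_split input_subprocess_stdout_split_alt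
  congr 1
  generalize PySem.Chars.splitOn input.toList ['\n'] = rows
  induction rows using List.reverseRecOn with
  | nil => rfl
  | append_singleton rs r ih =>
    rw [List.foldl_append, List.flatMap_append]
    simp only [List.foldl_cons, List.foldl_nil, List.flatMap_cons, List.flatMap_nil,
      List.append_nil]
    rw [pvRow_eq, ih]

-- ===== VERDICT (by name: the statement is the Claim_ definition above) =====
theorem input_subprocess_stdout_split_spec : Claim_equal_input_subprocess_stdout_split := by
  intro input _
  exact input_subprocess_stdout_split_eq_alt input
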